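-- pv_equiv track=rewrite | github.com/dcmonti/rec_align_exps | scripts/generate_rec_reads.py | can_be_formed_by_other_paths
-- ===== SOURCE A (Python) =====
-- def can_be_formed_by_other_paths(path, other_paths):
--     for other_path1 in other_paths:
--         for other_path2 in other_paths:
--             if other_path1 != other_path2:
--                 for k in range(1, len(other_path1)):
--                     for l in range(1, len(other_path2)):
--                         if other_path1[:k] + other_path2[l:] == path:
--                             return True
--     return False
-- ===== SOURCE B (Python) =====
-- def _pref_suppliers(path, other_paths, k):
--     prefix = path[:k]
--     return [p for p in other_paths if len(p) > k and p[:k] == prefix]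
--
--
-- def _suf_suppliers(path, other_paths, k):
--     suffix = path[k:]
--     m = len(suffix)
--     return [p for p in other_paths if len(p) > m and p[len(p) - m:] == suffix]
--
--
-- def can_be_formed_by_other_paths(path, other_paths):
--     # For each split point k of path, find paths supplying the proper prefix
--     # path[:k] and paths supplying the proper suffix path[k:]; succeed iff two
--     # distinct (by value) suppliers exist.
--     for k in range(1, len(path)):
--         prefs = _pref_suppliers(path, other_paths, k)
--         sufs = _suf_suppliers(path, other_paths, k)
--         if prefs and sufs:
--             p1 = prefs[0]
--             if any(q != p1 for q in sufs) or any(q != p1 for q in prefs):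
--                 return True
--     return False
-- ===== Notes on version B (the rewrite author's own statement) =====
-- stated objective: faster
-- what changed: B iterates over split points of path and indexes other_paths by whether they supply the matching proper prefix/suffix at each split (needing only two distinct suppliers), instead of A's scan over all ordered pairs of other paths with two nested slice loops.
import Mathlib
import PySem

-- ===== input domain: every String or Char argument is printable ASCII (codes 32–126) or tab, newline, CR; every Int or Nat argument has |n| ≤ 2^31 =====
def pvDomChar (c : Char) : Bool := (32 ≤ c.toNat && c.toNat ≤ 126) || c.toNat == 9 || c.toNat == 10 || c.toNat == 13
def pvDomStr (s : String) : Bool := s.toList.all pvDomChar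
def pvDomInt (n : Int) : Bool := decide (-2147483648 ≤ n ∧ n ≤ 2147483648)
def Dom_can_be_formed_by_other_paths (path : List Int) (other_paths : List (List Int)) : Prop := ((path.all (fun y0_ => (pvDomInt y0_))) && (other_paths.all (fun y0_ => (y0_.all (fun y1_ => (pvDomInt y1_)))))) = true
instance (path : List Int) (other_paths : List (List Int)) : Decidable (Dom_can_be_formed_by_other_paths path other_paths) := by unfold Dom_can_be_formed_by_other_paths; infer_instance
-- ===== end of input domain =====

-- B replaces A's scan over ordered pairs of other paths (with two inner slice
-- loops each) by a single scan over split points of `path`, collecting the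
-- prefix- and suffix-suppliers for each split; same return value everywhere.

-- ===== PORT A =====
def can_be_formed_by_other_paths (path : List Int) (other_paths : List (List Int)) : Bool :=
  other_paths.any (fun other_path1 =>
    other_paths.any (fun other_path2 =>
      other_path1 != other_path2 &&
      (PySem.List.pyRange 1 (other_path1.length) 1).any (fun k =>
        (PySem.List.pyRange 1 (other_path2.length) 1).any (fun l =>
          PySem.List.slice other_path1 none (some k) ++ PySem.List.slice other_path2 (some l) none == path))))

-- ===== PORT B =====
def prefSuppliers (path : List Int) (other_paths : List (List Int)) (k : Int) : List (List Int) :=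
  let pre := PySem.List.slice path none (some k)
  other_paths.filter (fun p => decide (k < (p.length : Int)) && (PySem.List.slice p none (some k) == pre))

def sufSuppliers (path : List Int) (other_paths : List (List Int)) (k : Int) : List (List Int) :=
  let suf := PySem.List.slice path (some k) none
  let m : Int := suf.length
  other_paths.filter (fun p => decide (m < (p.length : Int)) && (PySem.List.slice p (some ((p.length : Int) - m)) none == suf))

def can_be_formed_by_other_paths_alt (path : List Int) (other_paths : List (List Int)) : Bool :=
  (PySem.List.pyRange 1 (path.length) 1).any (fun k =>
    let prefs := prefSuppliers path other_paths k
    let sufs := sufSuppliers path other_paths k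
    !prefs.isEmpty && !sufs.isEmpty &&
      (match prefs with
       | [] => false
       | p1 :: _ => sufs.any (fun q => q != p1) || prefs.any (fun q => q != p1)))

-- ===== PRECONDITION & SPEC =====
def Spec_can_be_formed_by_other_paths (path : List Int) (other_paths : List (List Int)) (out : Bool) : Prop := out = can_be_formed_by_other_paths_alt path other_paths
instance (path : List Int) (other_paths : List (List Int)) (out : Bool) : Decidable (Spec_can_be_formed_by_other_paths path other_paths out) := by unfold Spec_can_be_formed_by_other_paths; infer_instance

-- ===== CLAIM (what is proved, stated in full; the proofs are below) =====
def Claim_equal_can_be_formed_by_other_paths : Prop := ∀ (path : List Int) (other_paths : List (List Int)), Dom_can_be_formed_by_other_paths path other_paths → Spec_can_be_formed_by_other_paths path other_paths (can_be_formed_by_other_paths path other_paths)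

-- ===== LEMMAS AND PROOFS =====

-- A's result as a proposition
def PropA (path : List Int) (other_paths : List (List Int)) : Prop :=
  ∃ p1 ∈ other_paths, ∃ p2 ∈ other_paths, p1 ≠ p2 ∧
    ∃ k : Int, (1 ≤ k ∧ k < (p1.length : Int)) ∧
      ∃ l : Int, (1 ≤ l ∧ l < (p2.length : Int)) ∧
        p1.take k.toNat ++ p2.drop l.toNat = path

-- B's result as a proposition
def PropB (path : List Int) (other_paths : List (List Int)) : Prop :=
  ∃ k : Int, (1 ≤ k ∧ k < (path.length : Int)) ∧
    ∃ p1 ∈ prefSuppliers path other_paths k, ∃ p2 ∈ sufSuppliers path other_paths k, p1 ≠ p2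

lemma mem_pref (path : List Int) (other_paths : List (List Int)) (k : Int) (hk : 0 ≤ k)
    (p : List Int) :
    p ∈ prefSuppliers path other_paths k ↔
      p ∈ other_paths ∧ k < (p.length : Int) ∧ p.take k.toNat = path.take k.toNat := by
  unfold prefSuppliers
  simp only [List.mem_filter, Bool.and_eq_true, decide_eq_true_eq, beq_iff_eq,
    PySem.List.slice_to _ hk]

lemma A_iff (path : List Int) (other_paths : List (List Int)) :
    can_be_formed_by_other_paths path other_paths = true ↔ PropA path other_paths := by
  simp only [can_be_formed_by_other_paths, PropA, List.any_eq_true, Bool.and_eq_true,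
    PySem.List.mem_pyRange_one, bne_iff_ne, beq_iff_eq]
  constructor
  · rintro ⟨p1, h1, p2, h2, hne, k, ⟨hk1, hk2⟩, l, ⟨hl1, hl2⟩, heq⟩
    refine ⟨p1, h1, p2, h2, hne, k, ⟨hk1, hk2⟩, l, ⟨hl1, hl2⟩, ?_⟩
    rwa [PySem.List.slice_to _ (by omega), PySem.List.slice_from _ (by omega)] at heq
  · rintro ⟨p1, h1, p2, h2, hne, k, ⟨hk1, hk2⟩, l, ⟨hl1, hl2⟩, heq⟩
    refine ⟨p1, h1, p2, h2, hne, k, ⟨hk1, hk2⟩, l, ⟨hl1, hl2⟩, ?_⟩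
    rwa [PySem.List.slice_to _ (by omega), PySem.List.slice_from _ (by omega)]

lemma pick_iff (prefs sufs : List (List Int)) :
    (!prefs.isEmpty && !sufs.isEmpty &&
      (match prefs with
       | [] => false
       | p1 :: _ => sufs.any (fun q => q != p1) || prefs.any (fun q => q != p1))) = true
    ↔ ∃ p1 ∈ prefs, ∃ p2 ∈ sufs, p1 ≠ p2 := by
  cases prefs with
  | nil => simp
  | cons a rest =>
    cases sufs with
    | nil => simp
    | cons b sb =>
      simp only [List.isEmpty_cons, Bool.not_false, Bool.true_and, Bool.or_eq_true, List.any_eq_true, bne_iff_ne]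
      constructor
      · rintro (h | h)
        · obtain ⟨q, hq, hqa⟩ := h
          exact ⟨a, List.mem_cons_self .., q, hq, fun h => hqa h.symm⟩
        · obtain ⟨q, hq, hqa⟩ := h
          by_cases hqb : q = b
          · exact ⟨a, List.mem_cons_self .., b, List.mem_cons_self .., fun h => hqa (hqb ▸ h.symm)⟩
          · exact ⟨q, hq, b, List.mem_cons_self .., hqb⟩
      · rintro ⟨p1, hp1, p2, hp2, hne⟩
        by_cases hp2a : p2 = a
        · exact Or.inr ⟨p1, hp1, fun h => hne (h.trans hp2a.symm)⟩
        · exact Or.inl ⟨p2, hp2, hp2a⟩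

lemma B_iff (path : List Int) (other_paths : List (List Int)) :
    can_be_formed_by_other_paths_alt path other_paths = true ↔ PropB path other_paths := by
  simp only [can_be_formed_by_other_paths_alt, PropB, List.any_eq_true,
    PySem.List.mem_pyRange_one, pick_iff]

lemma mem_suf (path : List Int) (other_paths : List (List Int)) (k : Int) (hk : 0 ≤ k)
    (p : List Int) :
    p ∈ sufSuppliers path other_paths k ↔
      p ∈ other_paths ∧ (path.drop k.toNat).length < p.length ∧
        p.drop (p.length - (path.drop k.toNat).length) = path.drop k.toNat := by
  unfold sufSuppliers
  simp only [List.mem_filter, Bool.and_eq_true, decide_eq_true_eq, beq_iff_eq,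
    PySem.List.slice_from _ hk]
  constructor
  · rintro ⟨hmem, hlt, heq⟩
    have hlt' : (path.drop k.toNat).length < p.length := by exact_mod_cast hlt
    refine ⟨hmem, hlt', ?_⟩
    rw [PySem.List.slice_from _ (by omega)] at heq
    have : ((p.length : Int) - ((path.drop k.toNat).length : Int)).toNat
        = p.length - (path.drop k.toNat).length := by omega
    rwa [this] at heq
  · rintro ⟨hmem, hlt, heq⟩
    refine ⟨hmem, by exact_mod_cast hlt, ?_⟩
    rw [PySem.List.slice_from _ (by omega)]
    have : ((p.length : Int) - ((path.drop k.toNat).length : Int)).toNat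
        = p.length - (path.drop k.toNat).length := by omega
    rwa [this]

lemma AB_iff (path : List Int) (other_paths : List (List Int)) :
    PropA path other_paths ↔ PropB path other_paths := by
  constructor
  · rintro ⟨p1, h1, p2, h2, hne, k, ⟨hk1, hk2⟩, l, ⟨hl1, hl2⟩, heq⟩
    have hk0 : 0 ≤ k := by omega
    have hkn : k.toNat ≤ p1.length := by omega
    have hlen1 : (p1.take k.toNat).length = k.toNat := by simp [hkn]
    have htake : path.take k.toNat = p1.take k.toNat := by
      rw [← heq]; exact List.take_left' hlen1
    have hdrop : path.drop k.toNat = p2.drop l.toNat := by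
      rw [← heq]; exact List.drop_left' hlen1
    have hn : path.length = k.toNat + (p2.length - l.toNat) := by
      rw [← heq]; simp [hlen1]
    have hln : l.toNat < p2.length := by omega
    refine ⟨k, ⟨hk1, by omega⟩, p1, ?_, p2, ?_, hne⟩
    · exact (mem_pref path other_paths k hk0 p1).2 ⟨h1, hk2, htake.symm⟩
    · refine (mem_suf path other_paths k hk0 p2).2 ⟨h2, ?_, ?_⟩
      · rw [hdrop]; simp; omega
      · rw [hdrop]
        have : p2.length - (p2.drop l.toNat).length = l.toNat := by simp; omega
        rw [this]
  · rintro ⟨k, ⟨hk1, hk2⟩, p1, hp1, p2, hp2, hne⟩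
    have hk0 : 0 ≤ k := by omega
    obtain ⟨h1, hklen, htake⟩ := (mem_pref path other_paths k hk0 p1).1 hp1
    obtain ⟨h2, hmlt, hdrop⟩ := (mem_suf path other_paths k hk0 p2).1 hp2
    have hm : (path.drop k.toNat).length = path.length - k.toNat := by simp
    have hkn : k.toNat < path.length := by omega
    refine ⟨p1, h1, p2, h2, hne, k, ⟨hk1, hklen⟩,
      ((p2.length - (path.drop k.toNat).length : Nat) : Int), ⟨by omega, by omega⟩, ?_⟩
    rw [Int.toNat_natCast, htake, hdrop, List.take_append_drop]

-- ===== VERDICT (by name: the statement is the Claim_ definition above) =====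
theorem can_be_formed_by_other_paths_spec : Claim_equal_can_be_formed_by_other_paths := by
  intro path other_paths _
  unfold Spec_can_be_formed_by_other_paths
  rw [Bool.eq_iff_iff, A_iff, B_iff]
  exact AB_iff path other_paths
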